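-- pv_equiv track=rewrite | github.com/FreshDemoTest/gql-standalone | gqlapi/lib/clients/clients/vercelapi/vercel.py | build_domain_name
-- ===== SOURCE A (Python) =====
-- import unicodedata
--
-- def build_domain_name(name: str, subdomain_alima: str) -> str:
--     normalized_string = unicodedata.normalize("NFKD", name)
--     result_string = "".join(
--         [char for char in normalized_string if not unicodedata.combining(char)]
--     )
--     return (
--         result_string.replace(" ", "-")
--         .lower()
--         .replace(".", "")
--         .replace(",", "")
--         .replace("_", "-")
--         + "."
--         + subdomain_alima
--     )
-- ===== SOURCE B (Python) =====
-- import unicodedata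
--
-- def build_domain_name(name: str, subdomain_alima: str) -> str:
--     out = []
--     for char in unicodedata.normalize("NFKD", name):
--         if unicodedata.combining(char):
--             continue
--         if char == " " or char == "_":
--             out.append("-")
--         elif char != "." and char != ",":
--             out.append(char.lower())
--     return "".join(out) + "." + subdomain_alima
-- ===== Notes on version B (the rewrite author's own statement) =====
-- stated objective: simpler
-- what changed: Replaces A's filter comprehension plus five whole-string passes (lower and four .replace calls) by a single character-by-character loop that classifies each character once and builds the output buffer directly.
import Mathlib
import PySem

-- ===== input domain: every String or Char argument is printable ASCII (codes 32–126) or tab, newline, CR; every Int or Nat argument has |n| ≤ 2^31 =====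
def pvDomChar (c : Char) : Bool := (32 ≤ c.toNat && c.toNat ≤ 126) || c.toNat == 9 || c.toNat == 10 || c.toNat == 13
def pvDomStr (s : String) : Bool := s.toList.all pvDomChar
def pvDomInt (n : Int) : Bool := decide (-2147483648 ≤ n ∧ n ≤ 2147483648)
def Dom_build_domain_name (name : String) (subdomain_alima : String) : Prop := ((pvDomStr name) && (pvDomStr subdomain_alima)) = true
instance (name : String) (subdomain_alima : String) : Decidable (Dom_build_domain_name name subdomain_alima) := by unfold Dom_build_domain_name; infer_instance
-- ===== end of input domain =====

-- B replaces A's filter comprehension plus five whole-string passes (lower and four replaces) by one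
-- character-classifying loop; objective: simpler (one pass), same asymptotic cost.

-- ===== PORT A =====
-- On the printable-ASCII domain Dom, unicodedata.normalize("NFKD", s) is the identity and
-- unicodedata.combining(c) is 0 for every character, so the normalization is ported as the
-- identity and the comprehension filter keeps every character (exact on Dom).
def build_domain_name (name : String) (subdomain_alima : String) : String :=
  let normalized_string : List Char := name.toList
  let result_string : List Char := normalized_string.filter (fun _ => true)
  String.ofList
    (PySem.Chars.replace
      (PySem.Chars.replace
        (PySem.Chars.replace
          (PySem.Chars.lower (PySem.Chars.replace result_string [' '] ['-']))
          ['.'] [])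
        [','] [])
      ['_'] ['-']
     ++ ('.' :: subdomain_alima.toList))

-- ===== PORT B =====
def build_domain_name_alt (name : String) (subdomain_alima : String) : String :=
  let out : List Char := name.toList.foldl (fun acc c =>
    if c = ' ' ∨ c = '_' then acc ++ ['-']
    else if c ≠ '.' ∧ c ≠ ',' then acc ++ [PySem.Chars.lowerChar c]
    else acc) []
  String.ofList (out ++ ('.' :: subdomain_alima.toList))

-- ===== PRECONDITION & SPEC =====
def Spec_build_domain_name (name : String) (subdomain_alima : String) (out : String) : Prop := out = build_domain_name_alt name subdomain_alima
instance (name : String) (subdomain_alima : String) (out : String) : Decidable (Spec_build_domain_name name subdomain_alima out) := by unfold Spec_build_domain_name; infer_instance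

-- ===== CLAIM (what is proved, stated in full; the proofs are below) =====
def Claim_equal_build_domain_name : Prop := ∀ (name : String) (subdomain_alima : String), Dom_build_domain_name name subdomain_alima → Spec_build_domain_name name subdomain_alima (build_domain_name name subdomain_alima)

-- ===== LEMMAS AND PROOFS =====

-- the per-character classification both pipelines compute
def pvSlug (c : Char) : List Char :=
  if c = ' ' ∨ c = '_' then ['-']
  else if c ≠ '.' ∧ c ≠ ',' then [PySem.Chars.lowerChar c]
  else []

-- single-character replace is a flatMap
lemma replace_go_single (a : Char) (r : List Char) :
    ∀ (fuel : Nat) (l acc : List Char), l.length ≤ fuel →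
      PySem.Chars.replace.go [a] r fuel l acc
        = acc.reverse ++ l.flatMap (fun c => if c = a then r else [c]) := by
  intro fuel
  induction fuel with
  | zero => intro l acc h; simp at h; subst h; simp [PySem.Chars.replace.go]
  | succ n ih =>
    intro l acc h
    cases l with
    | nil => simp [PySem.Chars.replace.go]
    | cons c t =>
      simp only [PySem.Chars.replace.go]
      by_cases hc : c = a
      · subst hc
        have hp : List.isPrefixOf [c] (c :: t) = true := by simp [List.isPrefixOf]
        simp only [hp, if_pos]
        rw [ih _ _ (by simpa using Nat.le_of_succ_le_succ h)]
        simp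
      · have hp : List.isPrefixOf [a] (c :: t) = false := by
          simp [List.isPrefixOf]; intro h'; exact absurd h'.symm hc
        simp only [hp]
        rw [if_neg (by simp), ih _ _ (by simpa using Nat.le_of_succ_le_succ h)]
        simp [hc]

lemma replace_single (l : List Char) (a : Char) (r : List Char) :
    PySem.Chars.replace l [a] r = l.flatMap (fun c => if c = a then r else [c]) := by
  simp [PySem.Chars.replace]
  rw [replace_go_single a r l.length l [] le_rfl]
  simp

-- lowerChar never produces '.', ',' or '_' from another character
lemma toNat_ofNat_valid (n : Nat) (h : n.isValidChar) : (Char.ofNat n).toNat = n := by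
  unfold Char.ofNat
  split <;> simp_all [Char.toNat, Char.ofNatAux]

lemma lowerChar_ne (c d : Char) (hd : d.toNat < 97) (h : c ≠ d) :
    PySem.Chars.lowerChar c ≠ d := by
  unfold PySem.Chars.lowerChar
  split_ifs with hc
  · unfold PySem.Chars.isupper at hc
    simp only [Bool.and_eq_true, decide_eq_true_eq] at hc
    have h1 : 65 ≤ c.toNat := hc.1
    have h2 : c.toNat ≤ 90 := hc.2
    have hv : (c.toNat + 32).isValidChar := Or.inl (by omega)
    intro he
    have := congrArg Char.toNat he
    rw [toNat_ofNat_valid _ hv] at this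
    omega
  · exact h

-- A's pipeline over a list is the flatMap of pvSlug
lemma chainA_eq (l : List Char) :
    PySem.Chars.replace
      (PySem.Chars.replace
        (PySem.Chars.replace
          (PySem.Chars.lower (PySem.Chars.replace l [' '] ['-']))
          ['.'] [])
        [','] [])
      ['_'] ['-'] = l.flatMap pvSlug := by
  simp only [replace_single, PySem.Chars.lower]
  induction l with
  | nil => simp
  | cons c t ih =>
    simp only [List.flatMap_cons, List.map_append, List.flatMap_append, ih]
    congr 1
    by_cases h1 : c = ' '
    · subst h1; simp [pvSlug, PySem.Chars.lowerChar, PySem.Chars.isupper]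
    by_cases h2 : c = '_'
    · subst h2; simp [pvSlug, PySem.Chars.lowerChar, PySem.Chars.isupper]
    by_cases h3 : c = '.'
    · subst h3; simp [pvSlug, PySem.Chars.lowerChar, PySem.Chars.isupper]
    by_cases h4 : c = ','
    · subst h4; simp [pvSlug, PySem.Chars.lowerChar, PySem.Chars.isupper]
    · have n1 := lowerChar_ne c '.' (by decide) h3
      have n2 := lowerChar_ne c ',' (by decide) h4
      have n3 := lowerChar_ne c '_' (by decide) h2
      simp [pvSlug, h1, h2, h3, h4, n1, n2, n3]

-- B's fold is the flatMap of pvSlug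
lemma foldB_eq (l : List Char) : ∀ acc : List Char,
    l.foldl (fun acc c =>
      if c = ' ' ∨ c = '_' then acc ++ ['-']
      else if c ≠ '.' ∧ c ≠ ',' then acc ++ [PySem.Chars.lowerChar c]
      else acc) acc = acc ++ l.flatMap pvSlug := by
  induction l with
  | nil => intro acc; simp
  | cons c t ih =>
    intro acc
    simp only [List.foldl_cons, List.flatMap_cons, ih, pvSlug]
    split_ifs <;> simp

-- ===== VERDICT (by name: the statement is the Claim_ definition above) =====
theorem build_domain_name_spec : Claim_equal_build_domain_name := by
  intro name subdomain_alima _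
  show build_domain_name name subdomain_alima = build_domain_name_alt name subdomain_alima
  unfold build_domain_name build_domain_name_alt
  simp only [List.filter_true, chainA_eq, foldB_eq, List.nil_append]
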